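-- pv_equiv track=rewrite | github.com/prit2410/DAAHandsOn | DAA Hands On 3/Benchmark2.py | f_modified
-- ===== SOURCE A (Python) =====
-- def f_modified(n):
--     x = 1
--     y = 1
--     for i in range(n):
--         for j in range(n):
--             x = x + 1
--             y = i + j
--     return x
-- ===== SOURCE B (Python) =====
-- def f_modified(n):
--     if n <= 0:
--         return 1
--     return 1 + n * n
-- ===== Notes on version B (the rewrite author's own statement) =====
-- stated objective: faster
-- what changed: Replaced the O(n^2) nested counting loops with the closed form 1 + n*n (returning 1 for n <= 0, where the loops never run).
import Mathlib
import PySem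

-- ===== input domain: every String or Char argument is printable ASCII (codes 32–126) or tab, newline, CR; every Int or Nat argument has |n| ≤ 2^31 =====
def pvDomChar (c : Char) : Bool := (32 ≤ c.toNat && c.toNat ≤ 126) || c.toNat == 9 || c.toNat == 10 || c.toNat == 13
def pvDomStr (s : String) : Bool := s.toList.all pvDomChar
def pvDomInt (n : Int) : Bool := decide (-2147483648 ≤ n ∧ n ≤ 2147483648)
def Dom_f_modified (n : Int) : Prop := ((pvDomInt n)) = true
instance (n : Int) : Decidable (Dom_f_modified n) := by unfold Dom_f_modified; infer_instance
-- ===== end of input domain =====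

-- B replaces the O(n^2) nested counting loops with the closed form 1 + n*n (1 for n ≤ 0).

-- ===== PORT A =====
def f_modified (n : Int) : Int :=
  ((PySem.List.pyRange 0 n 1).foldl
    (fun (s : Int × Int) i =>
      (PySem.List.pyRange 0 n 1).foldl (fun (t : Int × Int) j => (t.1 + 1, i + j)) s)
    (1, 1)).1

-- ===== PORT B =====
def f_modified_alt (n : Int) : Int :=
  if n ≤ 0 then 1 else 1 + n * n

-- ===== PRECONDITION & SPEC =====
def Spec_f_modified (n : Int) (out : Int) : Prop := out = f_modified_alt n
instance (n : Int) (out : Int) : Decidable (Spec_f_modified n out) := by unfold Spec_f_modified; infer_instance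

-- ===== CLAIM (what is proved, stated in full; the proofs are below) =====
def Claim_equal_f_modified : Prop := ∀ (n : Int), Dom_f_modified n → Spec_f_modified n (f_modified n)

-- ===== LEMMAS AND PROOFS =====

-- the inner loop adds the list's length to the first component
theorem pv_inner (i : Int) (l : List Int) (s : Int × Int) :
    ((l.foldl (fun (t : Int × Int) j => (t.1 + 1, i + j)) s)).1 = s.1 + l.length := by
  induction l generalizing s with
  | nil => simp
  | cons a l ih => simp [List.foldl, ih]; ring

-- the outer loop adds (length · length); first components only depend on first components
theorem pv_outer (n : Int) (l : List Int) (s : Int × Int) :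
    ((l.foldl
      (fun (s : Int × Int) i =>
        (PySem.List.pyRange 0 n 1).foldl (fun (t : Int × Int) j => (t.1 + 1, i + j)) s)
      s)).1 = s.1 + l.length * (PySem.List.pyRange 0 n 1).length := by
  induction l generalizing s with
  | nil => simp
  | cons a l ih => simp [List.foldl, ih, pv_inner]; ring

-- ===== VERDICT (by name: the statement is the Claim_ definition above) =====
theorem f_modified_spec : Claim_equal_f_modified := by
  intro n _
  unfold Spec_f_modified f_modified f_modified_alt
  rw [pv_outer]
  simp [PySem.List.length_pyRange_one]
  split_ifs with h
  · rw [max_eq_right h]; norm_num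
  · rw [max_eq_left (by omega : (0:Int) ≤ n)]
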